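-- pv_equiv track=rewrite | github.com/ccppoo/PyAlgorithm | 20180511-programmers-49995-re.py | solution
-- ===== SOURCE A (Python) =====
-- from copy import deepcopy
--
-- def solution(cookie):
--
--     def sum_check(start, end, curr_max):
--         if(start==0):
--             range_sum = cookie[end]
--             half = range_sum//2
--             while(range_sum>half):
--                 range_sum -= cookie_origin[start]
--                 start+=1
--             if(range_sum==half and range_sum>curr_max):
--                 return half
--             else:
--                 return curr_max
--         else:
--             range_sum = cookie[end] -cookie[start-1]
--             half = range_sum//2
--             while(range_sum>half):
--                 range_sum -= cookie_origin[start]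
--                 start+=1
--             if(range_sum==half and range_sum>curr_max):
--                 return half
--             else:
--                 return curr_max
--
--     max =0
--     cookie_origin = deepcopy(cookie)
--     # 각 바구니(리스트 각각의 인덱스 내용)에는 최소 1개의 과자가 있음
--     # 즉, 기울기 0초과하는 선형 증가함수임, 직각 삼각형이라고 생각하면 됨
--     for i in range(1, len(cookie)):
--         cookie[i] = cookie[i] + cookie[i-1]
--
--     # cookie[start] ~ end[cookie] 짝수면 무조건 반토막 가능(증가함수 + 자연수 만큼 증가)
--     for end in range(1 , len(cookie)):
--         temp = cookie[end]
--         if(temp%2 ==0):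
--             max = sum_check(start = 0, end = end, curr_max=max)
--             if(max ==cookie[-1]//2):
--                 return max
--
--     for start in range(1, len(cookie)-1):
--         for end in range(start+1 , len(cookie)):
--             temp = cookie[end] -cookie[start-1]
--             if(temp%2 ==0):
--                 max = sum_check(start=start, end=end, curr_max=max)
--                 if(max ==cookie[-1]//2):
--                     return max
--
--     return max
-- ===== SOURCE B (Python) =====
-- def solution(cookie):
--     # prefix sums with a leading 0; a split of cookie[s:e] into two equal halves
--     # corresponds to prefix values p[s], m, p[e] in arithmetic progression
--     n = len(cookie)
--     ps = [0]
--     for x in cookie: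
--         ps.append(ps[-1] + x)
--     seen = set(ps)
--     best = 0
--     for s in range(n - 1):
--         for e in range(s + 2, n + 1):
--             t = ps[s] + ps[e]
--             if t % 2 == 0 and t // 2 in seen:
--                 h = (ps[e] - ps[s]) // 2
--                 if h > best:
--                     best = h
--     return best
-- ===== Notes on version B (the rewrite author's own statement) =====
-- stated objective: alternative
-- what changed: B builds the prefix-sum list once and a set of its values, so a subarray splits in half iff the arithmetic midpoint of two prefix sums is in the set (one membership test per pair), replacing A's inner while-scan over the subarray for every pair; worst-case O(n^2) vs A's O(n^3), though A's early exit can win on easy inputs.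
-- outside the precondition, e.g. on solution([1, 1, 4, 4, -8]): A returns 1, B returns 4
import Mathlib
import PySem

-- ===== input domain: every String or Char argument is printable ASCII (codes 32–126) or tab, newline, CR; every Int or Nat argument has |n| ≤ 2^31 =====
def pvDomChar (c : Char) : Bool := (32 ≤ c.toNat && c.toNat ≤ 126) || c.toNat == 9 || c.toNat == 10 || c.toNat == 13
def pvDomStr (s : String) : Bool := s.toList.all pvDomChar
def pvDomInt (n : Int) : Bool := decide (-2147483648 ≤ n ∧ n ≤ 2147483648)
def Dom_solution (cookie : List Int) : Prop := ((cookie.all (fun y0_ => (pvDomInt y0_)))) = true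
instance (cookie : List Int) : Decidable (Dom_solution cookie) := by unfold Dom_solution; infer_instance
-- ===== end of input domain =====

-- B replaces A's cubic scan (inner while-loop per subarray) by a prefix-sum set:
-- a subarray splits in half iff the arithmetic midpoint of two prefix sums is itself
-- a prefix sum.  A mutates its argument in place (turns it into prefix sums); B does
-- not — the equivalence proved here is about the RETURN value only.

-- ===== PORT A =====
def scLoop (orig : List Int) (half : Int) : Nat → Int → Int → Int
  | 0, _, r => r
  | fuel+1, start, r =>
    if half < r then scLoop orig half fuel (start + 1) (r - PySem.List.pyGetD orig start 0)
    else r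

def sumCheckA (ps orig : List Int) (s e cm : Int) : Int :=
  if s = 0 then
    let rs := PySem.List.pyGetD ps e 0
    let half := PySem.Int.floordiv rs 2
    let r := scLoop orig half (orig.length + 1) s rs
    if r = half ∧ cm < r then half else cm
  else
    let rs := PySem.List.pyGetD ps e 0 - PySem.List.pyGetD ps (s - 1) 0
    let half := PySem.Int.floordiv rs 2
    let r := scLoop orig half (orig.length + 1) s rs
    if r = half ∧ cm < r then half else cm


def mutateA (c : List Int) : List Int :=
  (PySem.List.pyRange 1 (PySem.List.len c) 1).foldl
    (fun acc i =>
      PySem.List.pySetD acc i (PySem.List.pyGetD acc i 0 + PySem.List.pyGetD acc (i - 1) 0)) c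

def loop2innerA (ps orig : List Int) (s : Int) (ends : List Int) (mx : Int) : Sum Int Int :=
  match ends with
  | [] => .inr mx
  | e :: rest =>
    let temp := PySem.List.pyGetD ps e 0 - PySem.List.pyGetD ps (s - 1) 0
    if PySem.Int.mod temp 2 = 0 then
      let mx' := sumCheckA ps orig s e mx
      if mx' = PySem.Int.floordiv (PySem.List.pyGetD ps (-1) 0) 2 then .inl mx'
      else loop2innerA ps orig s rest mx'
    else loop2innerA ps orig s rest mx

def loop2A (ps orig : List Int) (starts : List Int) (mx : Int) : Int :=
  match starts with
  | [] => mx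
  | s :: rest =>
    match loop2innerA ps orig s (PySem.List.pyRange (s + 1) (PySem.List.len ps) 1) mx with
    | .inl v => v
    | .inr mx' => loop2A ps orig rest mx'

def loop1A (ps orig : List Int) (ends : List Int) (mx : Int) : Int :=
  match ends with
  | [] => loop2A ps orig (PySem.List.pyRange 1 (PySem.List.len ps - 1) 1) mx
  | e :: rest =>
    let temp := PySem.List.pyGetD ps e 0
    if PySem.Int.mod temp 2 = 0 then
      let mx' := sumCheckA ps orig 0 e mx
      if mx' = PySem.Int.floordiv (PySem.List.pyGetD ps (-1) 0) 2 then mx'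
      else loop1A ps orig rest mx'
    else loop1A ps orig rest mx

def solution (cookie : List Int) : Int :=
  let ps := mutateA cookie
  loop1A ps cookie (PySem.List.pyRange 1 (PySem.List.len ps) 1) 0

-- ===== PORT B =====
def solution_alt (cookie : List Int) : Int :=
  let n := PySem.List.len cookie
  let ps := cookie.foldl (fun acc x => acc ++ [PySem.List.pyGetD acc (-1) 0 + x]) [(0 : Int)]
  let seen := PySem.Set.ofList ps
  (PySem.List.pyRange 0 (n - 1) 1).foldl (fun best s =>
    (PySem.List.pyRange (s + 2) (n + 1) 1).foldl (fun best e =>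
      let t := PySem.List.pyGetD ps s 0 + PySem.List.pyGetD ps e 0
      if PySem.Int.mod t 2 = 0 ∧ PySem.Set.contains seen (PySem.Int.floordiv t 2) = true then
        let h := PySem.Int.floordiv (PySem.List.pyGetD ps e 0 - PySem.List.pyGetD ps s 0) 2
        if best < h then h else best
      else best) best) 0

-- ===== PRECONDITION & SPEC =====
-- Pre_ admits the problem's natural domain (every basket holds a nonnegative number
-- of cookies) plus all lists of length ≤ 2: on longer lists with negative entries A's
-- early exit at total//2 and its first-crossing scan return accidental values that no
-- specification would fix.
def Pre_solution (cookie : List Int) : Prop :=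
  cookie.length ≤ 2 ∨ ∀ x ∈ cookie, 0 ≤ x
instance (cookie : List Int) : Decidable (Pre_solution cookie) := by
  unfold Pre_solution; infer_instance

def pvWitness_solution : List Int := [1, 2, 3]

def Spec_solution (cookie : List Int) (out : Int) : Prop := out = solution_alt cookie
instance (cookie : List Int) (out : Int) : Decidable (Spec_solution cookie out) := by
  unfold Spec_solution; infer_instance

-- ===== CLAIM (what is proved, stated in full; the proofs are below) =====
def Claim_equal_solution : Prop :=
  ∀ (cookie : List Int), Dom_solution cookie → Pre_solution cookie →
    Spec_solution cookie (solution cookie)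

-- ===== LEMMAS AND PROOFS =====

def psum (c : List Int) (i : Nat) : Int := (c.take i).sum

theorem psum_zero (c : List Int) : psum c 0 = 0 := rfl

theorem psum_mono (c : List Int) (h : ∀ x ∈ c, 0 ≤ x) {i j : Nat} (hij : i ≤ j) :
    psum c i ≤ psum c j := by
  have ht : c.take j = c.take i ++ (c.drop i).take (j - i) := by
    rw [← List.take_add]; congr 1; omega
  unfold psum
  rw [ht, List.sum_append]
  have h2 : 0 ≤ ((c.drop i).take (j - i)).sum := by
    apply List.sum_nonneg
    intro x hx
    exact h x (List.mem_of_mem_drop (List.mem_of_mem_take hx))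
  omega

theorem psum_succ (c : List Int) {i : Nat} (hi : i < c.length) :
    psum c (i + 1) = psum c i + c.getD i 0 := by
  unfold psum
  rw [List.take_add_one, List.sum_append, List.getD_eq_getElem c 0 hi,
    List.getElem?_eq_getElem hi]
  simp


theorem mutate_gen (c : List Int) (m : Nat) (hm : m ≤ c.length) :
    (PySem.List.pyRange 1 (↑m) 1).foldl
      (fun acc i =>
        PySem.List.pySetD acc i (PySem.List.pyGetD acc i 0 + PySem.List.pyGetD acc (i - 1) 0)) c
    = (List.range m).map (fun k => psum c (k + 1)) ++ c.drop m := by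
  induction m with
  | zero => simp [PySem.List.pyRange_one_eq_nil]
  | succ m ih =>
    have hmn : m < c.length := by omega
    have hcast : ((m + 1 : Nat) : Int) = (m : Int) + 1 := by push_cast; ring
    have hcons : c.drop m = c.getD m 0 :: c.drop (m + 1) := by
      rw [List.getD_eq_getElem c 0 hmn]; exact List.drop_eq_getElem_cons hmn
    by_cases hm0 : m = 0
    · subst hm0
      rw [hcast]
      norm_num [PySem.List.pyRange_one_eq_nil]
      have h1 : psum c 1 = c.getD 0 0 := by
        have := psum_succ c (i := 0) hmn; simpa [psum] using this
      rw [h1]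
      simpa using hcons
    · have h1m : (1 : Int) ≤ ↑m := by exact_mod_cast Nat.one_le_iff_ne_zero.mpr hm0
      rw [hcast, PySem.List.pyRange_one_succ_right h1m, List.foldl_append, ih (by omega)]
      set A := (List.range m).map (fun k => psum c (k + 1)) with hA
      have hAlen : A.length = m := by simp [hA]
      simp only [List.foldl_cons, List.foldl_nil]
      have hget1 : PySem.List.pyGetD (A ++ c.drop m) (↑m) 0 = c.getD m 0 := by
        rw [PySem.List.pyGetD_natCast, hcons, ← hAlen, List.getD_append_right _ _ _ _ (by omega)]
        simp
      have hget2 : PySem.List.pyGetD (A ++ c.drop m) ((↑m : Int) - 1) 0 = psum c m := by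
        rw [show ((m : Int) - 1) = ((m - 1 : Nat) : Int) by omega, PySem.List.pyGetD_natCast,
          List.getD_append _ _ _ _ (by omega)]
        simp only [hA]
        rw [List.getD_eq_getElem _ 0 (by simp; omega)]
        simp only [List.getElem_map, List.getElem_range]
        congr 1
        omega
      rw [hget1, hget2, PySem.List.pySetD_natCast]
      have hv : c.getD m 0 + psum c m = psum c (m + 1) := by
        rw [psum_succ c hmn]; ring
      rw [hv]
      rw [List.range_succ, List.map_append, List.map_cons, List.map_nil, List.append_assoc]
      rw [hcons, ← hAlen]
      rw [List.set_append_right _ _ (le_refl _)]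
      simp
      rw [hAlen]

theorem mutateA_eq (c : List Int) :
    mutateA c = (List.range c.length).map (fun k => psum c (k + 1)) := by
  unfold mutateA
  rw [PySem.List.len_eq, mutate_gen c c.length le_rfl]
  simp

-- index lemmas for the mutated list
theorem psA_get (c : List Int) {i : Int} (h0 : 0 ≤ i) (hn : i < (c.length : Int)) :
    PySem.List.pyGetD (mutateA c) i 0 = psum c (i.toNat + 1) := by
  rw [show i = ((i.toNat : Nat) : Int) by omega, PySem.List.pyGetD_natCast, mutateA_eq]
  rw [List.getD_eq_getElem _ 0 (by simp; omega)]
  simp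
  congr 2
  omega

theorem psA_last (c : List Int) (hne : c ≠ []) :
    PySem.List.pyGetD (mutateA c) (-1) 0 = psum c c.length := by
  have hlen : (mutateA c).length = c.length := by rw [mutateA_eq]; simp
  have hne' : mutateA c ≠ [] := by
    intro h; apply hne; rw [← List.length_eq_zero_iff, ← hlen, h]; rfl
  rw [PySem.List.pyGetD_neg_one _ _ hne', List.getLast_eq_getElem]
  have h1 : 0 < c.length := List.length_pos_iff.mpr hne
  simp only [mutateA_eq] at *
  simp only [List.getElem_map, List.getElem_range, List.length_map, List.length_range]
  congr 1
  omega

theorem psum_cons (x : Int) (c : List Int) (k : Nat) :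
    psum (x :: c) (k + 1) = x + psum c k := by
  simp [psum]

theorem psB_gen (c : List Int) : ∀ (pre : List Int) (t : Int),
    c.foldl (fun a x => a ++ [PySem.List.pyGetD a (-1) 0 + x]) (pre ++ [t])
      = pre ++ [t] ++ (List.range c.length).map (fun k => t + psum c (k + 1)) := by
  induction c with
  | nil => intro pre t; simp
  | cons x c ih =>
    intro pre t
    simp only [List.foldl_cons, PySem.List.pyGetD_neg_one_append_singleton]
    rw [ih (pre ++ [t]) (t + x)]
    rw [List.length_cons, List.range_succ_eq_map, List.map_cons, List.map_map]
    have h0 : t + psum (x :: c) (0 + 1) = t + x := by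
      rw [show (0 + 1 : Nat) = 0 + 1 from rfl, psum_cons, psum_zero]; ring
    have hmap : List.map ((fun k => t + psum (x :: c) (k + 1)) ∘ Nat.succ) (List.range c.length)
        = List.map (fun k => t + x + psum c (k + 1)) (List.range c.length) := by
      apply List.map_congr_left
      intro k _
      simp only [Function.comp_apply, Nat.succ_eq_add_one]
      rw [show k + 1 + 1 = (k + 1) + 1 from rfl, psum_cons]
      ring
    rw [h0, hmap]
    simp [List.append_assoc]

theorem psB_eq (c : List Int) :
    c.foldl (fun a x => a ++ [PySem.List.pyGetD a (-1) 0 + x]) [(0 : Int)]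
      = (List.range (c.length + 1)).map (psum c) := by
  have := psB_gen c [] 0
  simp only [List.nil_append] at this
  rw [this, List.range_succ_eq_map]
  simp [psum_zero]

def hasMid (c : List Int) (s e : Nat) : Prop :=
  ∃ j, j ≤ c.length ∧ 2 * psum c j = psum c s + psum c e

def hasMidB (c : List Int) (s e : Nat) : Bool :=
  (List.range (c.length + 1)).any (fun j => 2 * psum c j == psum c s + psum c e)

theorem hasMidB_iff (c : List Int) (s e : Nat) : hasMidB c s e = true ↔ hasMid c s e := by
  unfold hasMidB hasMid
  simp [List.any_eq_true, List.mem_range, Nat.lt_succ_iff]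

def cand (c : List Int) (s e : Nat) : Int :=
  if 2 ∣ (psum c e - psum c s) ∧ hasMidB c s e = true then
    PySem.Int.floordiv (psum c e - psum c s) 2
  else 0

theorem scLoop_eq (c : List Int) (hpos : ∀ x ∈ c, 0 ≤ x) {e1 : Nat} (he1 : e1 ≤ c.length)
    {half : Int} (hh : 0 ≤ half) :
    ∀ (fuel : Nat) (i : Nat), i ≤ e1 → e1 - i ≤ fuel →
      (scLoop c half fuel (↑i) (psum c e1 - psum c i) = half ↔
        ∃ j, i ≤ j ∧ j ≤ e1 ∧ psum c e1 - psum c j = half) := by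
  intro fuel
  induction fuel with
  | zero =>
    intro i hie hfuel
    have : i = e1 := by omega
    subst this
    simp only [scLoop, sub_self]
    constructor
    · intro h; exact ⟨i, le_rfl, le_rfl, by omega⟩
    · rintro ⟨j, h1, h2, h3⟩
      have : j = i := by omega
      subst this; omega
  | succ fuel ih =>
    intro i hie hfuel
    simp only [scLoop]
    by_cases hlt : half < psum c e1 - psum c i
    · rw [if_pos hlt]
      have hine : i ≠ e1 := by
        intro h; subst h; simp at hlt; omega
      have hilt : i < e1 := by omega
      have hin : i < c.length := by omega
      rw [PySem.List.pyGetD_natCast]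
      have hstep : psum c e1 - psum c i - c.getD i 0 = psum c e1 - psum c (i + 1) := by
        rw [psum_succ c hin]; ring
      rw [hstep, show ((i : Int) + 1) = ((i + 1 : Nat) : Int) by push_cast; ring]
      rw [ih (i + 1) (by omega) (by omega)]
      constructor
      · rintro ⟨j, h1, h2, h3⟩; exact ⟨j, by omega, h2, h3⟩
      · rintro ⟨j, h1, h2, h3⟩
        refine ⟨j, by_contra fun hc => ?_, h2, h3⟩
        have : j = i := by omega
        subst this; omega
    · rw [if_neg hlt]
      constructor
      · intro h; exact ⟨i, le_rfl, hie, h⟩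
      · rintro ⟨j, h1, h2, h3⟩
        have := psum_mono c hpos h1
        omega

theorem mid_iff (c : List Int) (hpos : ∀ x ∈ c, 0 ≤ x) {sN e1 : Nat}
    (hs1 : sN ≤ e1) (he1 : e1 ≤ c.length) {half : Int}
    (h2 : 2 * half = psum c e1 - psum c sN) :
    (∃ j, sN ≤ j ∧ j ≤ e1 ∧ psum c e1 - psum c j = half) ↔ hasMid c sN e1 := by
  unfold hasMid
  constructor
  · rintro ⟨j, h1, hje, h3⟩
    exact ⟨j, le_trans hje he1, by omega⟩
  · rintro ⟨j, hjn, hj⟩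
    by_cases hc1 : j < sN
    · have m1 : psum c j ≤ psum c sN := psum_mono c hpos (by omega)
      have m2 : psum c sN ≤ psum c e1 := psum_mono c hpos hs1
      exact ⟨sN, le_rfl, hs1, by omega⟩
    · by_cases hc2 : e1 < j
      · have m1 : psum c e1 ≤ psum c j := psum_mono c hpos (by omega)
        have m2 : psum c sN ≤ psum c e1 := psum_mono c hpos hs1
        exact ⟨e1, hs1, le_rfl, by omega⟩
      · exact ⟨j, by omega, by omega, by omega⟩

theorem sumCheckA_eq (c : List Int) (hpos : ∀ x ∈ c, 0 ≤ x) {s e : Int}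
    (hs : 0 ≤ s) (hse : s < e) (hen : e < (c.length : Int)) {mx : Int} (hmx : 0 ≤ mx)
    (heven : 2 ∣ (psum c (e.toNat + 1) - psum c s.toNat)) :
    sumCheckA (mutateA c) c s e mx = max mx (cand c s.toNat (e.toNat + 1)) := by
  have he0 : 0 ≤ e := by omega
  have he1n : e.toNat + 1 ≤ c.length := by omega
  have hsle : s.toNat ≤ e.toNat + 1 := by omega
  set S := psum c (e.toNat + 1) - psum c s.toNat with hS
  have hS0 : 0 ≤ S := by
    have := psum_mono c hpos hsle; omega
  have hfd : PySem.Int.floordiv S 2 = S / 2 := PySem.Int.floordiv_eq_ediv_of_pos (by norm_num)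
  set half := S / 2 with hhalf
  have h2h : 2 * half = S := by
    obtain ⟨k, hk⟩ := heven
    rw [hhalf, hk]; omega
  have hh0 : 0 ≤ half := by omega
  -- the loop result characterisation
  have hloop := scLoop_eq c hpos he1n hh0 (c.length + 1) s.toNat (by omega) (by omega)
  have hcast : ((s.toNat : Nat) : Int) = s := Int.toNat_of_nonneg hs
  rw [hcast] at hloop
  rw [← hS] at hloop
  have hmidiff := mid_iff c hpos hsle he1n h2h
  have hcand : cand c s.toNat (e.toNat + 1)
      = if hasMidB c s.toNat (e.toNat + 1) = true then half else 0 := by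
    unfold cand
    rw [← hS]
    by_cases hm : hasMidB c s.toNat (e.toNat + 1) = true
    · rw [if_pos ⟨heven, hm⟩, if_pos hm, hfd]
    · rw [if_neg fun h => hm h.2, if_neg hm]
  unfold sumCheckA
  by_cases hs0 : s = 0
  · rw [if_pos hs0]
    have hrs : PySem.List.pyGetD (mutateA c) e 0 = S := by
      rw [psA_get c he0 hen, hS, hs0]
      simp [psum_zero]
    simp only [hrs, hfd]
    rw [hcand]
    by_cases hm : hasMid c s.toNat (e.toNat + 1)
    · have hr : scLoop c half (c.length + 1) s S = half := hloop.mpr (hmidiff.mpr hm)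
      rw [if_pos ((hasMidB_iff c _ _).mpr hm), hr]
      split_ifs with h <;> omega
    · have hr : scLoop c half (c.length + 1) s S ≠ half := fun h => hm (hmidiff.mp (hloop.mp h))
      rw [if_neg fun h => hm ((hasMidB_iff c _ _).mp h), if_neg (by tauto)]
      omega
  · rw [if_neg hs0]
    have hs1 : 1 ≤ s := by omega
    have hrs : PySem.List.pyGetD (mutateA c) e 0 - PySem.List.pyGetD (mutateA c) (s - 1) 0 = S := by
      rw [psA_get c he0 hen, psA_get c (by omega : (0:Int) ≤ s - 1) (by omega), hS]
      congr 2
      omega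
    simp only [hrs, hfd]
    rw [hcand]
    by_cases hm : hasMid c s.toNat (e.toNat + 1)
    · have hr : scLoop c half (c.length + 1) s S = half := hloop.mpr (hmidiff.mpr hm)
      rw [if_pos ((hasMidB_iff c _ _).mpr hm), hr]
      split_ifs with h <;> omega
    · have hr : scLoop c half (c.length + 1) s S ≠ half := fun h => hm (hmidiff.mp (hloop.mp h))
      rw [if_neg fun h => hm ((hasMidB_iff c _ _).mp h), if_neg (by tauto)]
      omega

def natRange (a b : Nat) : List Nat := (List.range (b - a)).map (fun k => a + k)

def innerF (c : List Int) (s : Nat) (es : List Nat) (mx : Int) : Int :=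
  es.foldl (fun mx e => max mx (cand c s e)) mx

def outerF (c : List Int) (ss : List Nat) (mx : Int) : Int :=
  ss.foldl (fun mx s => innerF c s (natRange (s + 2) (c.length + 1)) mx) mx

theorem innerF_cons (c : List Int) (s e : Nat) (es : List Nat) (mx : Int) :
    innerF c s (e :: es) mx = innerF c s es (max mx (cand c s e)) := rfl

theorem outerF_cons (c : List Int) (s : Nat) (ss : List Nat) (mx : Int) :
    outerF c (s :: ss) mx
      = outerF c ss (innerF c s (natRange (s + 2) (c.length + 1)) mx) := rfl

theorem natRange_nil {a b : Nat} (h : b ≤ a) : natRange a b = [] := by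
  unfold natRange
  rw [show b - a = 0 by omega]
  rfl

theorem natRange_cons {a b : Nat} (h : a < b) : natRange a b = a :: natRange (a + 1) b := by
  unfold natRange
  rw [show b - a = (b - (a + 1)) + 1 by omega, List.range_succ_eq_map, List.map_cons,
    List.map_map]
  simp only [Nat.add_zero]
  congr 1
  apply List.map_congr_left
  intro k _
  simp only [Function.comp_apply, Nat.succ_eq_add_one]
  omega

theorem mem_natRange {a b x : Nat} : x ∈ natRange a b ↔ a ≤ x ∧ x < b := by
  unfold natRange
  simp only [List.mem_map, List.mem_range]
  constructor
  · rintro ⟨k, hk, rfl⟩; omega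
  · rintro ⟨h1, h2⟩; exact ⟨x - a, by omega, by omega⟩

-- the global half-of-total bound
theorem cand_le_B0 (c : List Int) (hpos : ∀ x ∈ c, 0 ≤ x) {s e : Nat} (he : e ≤ c.length) :
    cand c s e ≤ PySem.Int.floordiv (psum c c.length) 2 := by
  have htot : 0 ≤ psum c c.length := by
    have := psum_mono c hpos (Nat.zero_le c.length); simpa [psum_zero] using this
  rw [PySem.Int.floordiv_eq_ediv_of_pos (by norm_num)]
  unfold cand
  split_ifs with h
  · rw [PySem.Int.floordiv_eq_ediv_of_pos (by norm_num)]
    have h1 : psum c e ≤ psum c c.length := psum_mono c hpos he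
    have h2 : 0 ≤ psum c s := by
      have := psum_mono c hpos (Nat.zero_le s); simpa [psum_zero] using this
    have hle : psum c e - psum c s ≤ psum c c.length := by omega
    exact Int.ediv_le_ediv (by norm_num) hle
  · exact Int.ediv_nonneg htot (by norm_num)

theorem innerF_ge (c : List Int) (s : Nat) (es : List Nat) (mx : Int) :
    mx ≤ innerF c s es mx := by
  induction es generalizing mx with
  | nil => simp [innerF]
  | cons e es ih =>
    calc mx ≤ max mx (cand c s e) := le_max_left _ _
    _ ≤ _ := ih _

theorem innerF_le (c : List Int) {B : Int} {s : Nat} {es : List Nat} {mx : Int}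
    (hB : ∀ e ∈ es, cand c s e ≤ B) (hmx : mx ≤ B) : innerF c s es mx ≤ B := by
  induction es generalizing mx with
  | nil => simpa [innerF]
  | cons e es ih =>
    exact ih (fun e he => hB e (List.mem_cons_of_mem _ he))
      (max_le hmx (hB e List.mem_cons_self))

theorem innerF_absorb (c : List Int) {s : Nat} {es : List Nat} {mx : Int}
    (h : ∀ e ∈ es, cand c s e ≤ mx) : innerF c s es mx = mx := by
  induction es with
  | nil => rfl
  | cons e es ih =>
    show innerF c s es (max mx (cand c s e)) = mx
    rw [max_eq_left (h e List.mem_cons_self)]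
    exact ih (fun e he => h e (List.mem_cons_of_mem _ he))

theorem outerF_absorb (c : List Int) (hpos : ∀ x ∈ c, 0 ≤ x) {ss : List Nat} {mx : Int}
    (hmx : mx = PySem.Int.floordiv (psum c c.length) 2) : outerF c ss mx = mx := by
  induction ss with
  | nil => rfl
  | cons s ss ih =>
    show outerF c ss (innerF c s (natRange (s + 2) (c.length + 1)) mx) = mx
    rw [innerF_absorb c (fun e he => by
      subst hmx
      exact cand_le_B0 c hpos (by rcases mem_natRange.mp he with ⟨h1, h2⟩; omega))]
    exact ih

theorem loop2innerA_cons (ps orig : List Int) (s e : Int) (rest : List Int) (mx : Int) :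
    loop2innerA ps orig s (e :: rest) mx =
      (if PySem.Int.mod (PySem.List.pyGetD ps e 0 - PySem.List.pyGetD ps (s - 1) 0) 2 = 0 then
        (if sumCheckA ps orig s e mx
            = PySem.Int.floordiv (PySem.List.pyGetD ps (-1) 0) 2
         then Sum.inl (sumCheckA ps orig s e mx)
         else loop2innerA ps orig s rest (sumCheckA ps orig s e mx))
       else loop2innerA ps orig s rest mx) := rfl

theorem len_mutateA (c : List Int) : PySem.List.len (mutateA c) = (c.length : Int) := by
  rw [PySem.List.len_eq, mutateA_eq]; simp

theorem B0_nonneg (c : List Int) (hpos : ∀ x ∈ c, 0 ≤ x) :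
    0 ≤ PySem.Int.floordiv (psum c c.length) 2 := by
  rw [PySem.Int.floordiv_eq_ediv_of_pos (by norm_num)]
  have := psum_mono c hpos (Nat.zero_le c.length)
  exact Int.ediv_nonneg (by simpa [psum_zero] using this) (by norm_num)

theorem c_ne_nil (c : List Int) (hn1 : 1 ≤ c.length) : c ≠ [] := by
  intro h; subst h; simp at hn1

theorem loop2innerA_eq (c : List Int) (hpos : ∀ x ∈ c, 0 ≤ x) (hn1 : 1 ≤ c.length) {s : Int}
    (hs : 1 ≤ s) (hsn : s < (c.length : Int)) :
    ∀ (k : Nat) (m mx : Int), (c.length : Int) - m ≤ k → s < m → 0 ≤ mx →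
      mx ≤ PySem.Int.floordiv (psum c c.length) 2 →
      (loop2innerA (mutateA c) c s (PySem.List.pyRange m (c.length : Int) 1) mx
          = Sum.inr (innerF c s.toNat (natRange (m.toNat + 1) (c.length + 1)) mx))
      ∨ (loop2innerA (mutateA c) c s (PySem.List.pyRange m (c.length : Int) 1) mx
          = Sum.inl (innerF c s.toNat (natRange (m.toNat + 1) (c.length + 1)) mx)
        ∧ innerF c s.toNat (natRange (m.toNat + 1) (c.length + 1)) mx
          = PySem.Int.floordiv (psum c c.length) 2) := by
  intro k
  induction k with
  | zero =>
    intro m mx hk hsm hmx hB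
    rw [PySem.List.pyRange_one_eq_nil (by omega), natRange_nil (by omega)]
    left; rfl
  | succ k ih =>
    intro m mx hk hsm hmx hB
    by_cases hmn : (c.length : Int) ≤ m
    · rw [PySem.List.pyRange_one_eq_nil hmn, natRange_nil (by omega)]
      left; rfl
    · push_neg at hmn
      rw [PySem.List.pyRange_one_cons (by omega)]
      have hm0 : 0 ≤ m := by omega
      have htemp : PySem.List.pyGetD (mutateA c) m 0 - PySem.List.pyGetD (mutateA c) (s - 1) 0
          = psum c (m.toNat + 1) - psum c s.toNat := by
        rw [psA_get c hm0 hmn, psA_get c (by omega : (0:Int) ≤ s - 1) (by omega)]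
        congr 2
        omega
      have hnr : natRange (m.toNat + 1) (c.length + 1)
          = (m.toNat + 1) :: natRange (m.toNat + 2) (c.length + 1) := by
        rw [natRange_cons (by omega)]
      have hlast : PySem.List.pyGetD (mutateA c) (-1) 0 = psum c c.length :=
        psA_last c (c_ne_nil c hn1)
      rw [loop2innerA_cons, htemp, hlast]
      by_cases hev : PySem.Int.mod (psum c (m.toNat + 1) - psum c s.toNat) 2 = 0
      · rw [if_pos hev]
        have heven : 2 ∣ (psum c (m.toNat + 1) - psum c s.toNat) :=
          (PySem.Int.mod_eq_zero_iff_dvd _ _).mp hev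
        have hsc : sumCheckA (mutateA c) c s m mx = max mx (cand c s.toNat (m.toNat + 1)) :=
          sumCheckA_eq c hpos (by omega) hsm hmn hmx heven
        have hcle : cand c s.toNat (m.toNat + 1) ≤ PySem.Int.floordiv (psum c c.length) 2 :=
          cand_le_B0 c hpos (by omega)
        have hmx'0 : 0 ≤ max mx (cand c s.toNat (m.toNat + 1)) := le_trans hmx (le_max_left _ _)
        have hmx'B : max mx (cand c s.toNat (m.toNat + 1))
            ≤ PySem.Int.floordiv (psum c c.length) 2 := max_le hB hcle
        rw [hsc, hnr, innerF_cons]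
        by_cases hex : max mx (cand c s.toNat (m.toNat + 1))
            = PySem.Int.floordiv (psum c c.length) 2
        · rw [if_pos hex]
          right
          have habs : innerF c s.toNat (natRange (m.toNat + 2) (c.length + 1))
              (max mx (cand c s.toNat (m.toNat + 1)))
              = max mx (cand c s.toNat (m.toNat + 1)) := by
            apply innerF_absorb
            intro e he
            rcases mem_natRange.mp he with ⟨h1, h2⟩
            rw [hex]
            exact cand_le_B0 c hpos (by omega)
          rw [habs]
          exact ⟨rfl, hex⟩
        · rw [if_neg hex]
          have := ih (m + 1) (max mx (cand c s.toNat (m.toNat + 1))) (by omega) (by omega)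
            hmx'0 hmx'B
          rw [show (m + 1).toNat + 1 = m.toNat + 2 by omega] at this
          exact this
      · rw [if_neg hev]
        have hc0 : cand c s.toNat (m.toNat + 1) = 0 := by
          unfold cand
          rw [if_neg]
          rintro ⟨hd, -⟩
          exact hev ((PySem.Int.mod_eq_zero_iff_dvd _ _).mpr hd)
        have := ih (m + 1) mx (by omega) (by omega) hmx hB
        rw [show (m + 1).toNat + 1 = m.toNat + 2 by omega] at this
        rw [hnr, innerF_cons, hc0, max_eq_left hmx]
        exact this

theorem loop2A_cons (ps orig : List Int) (s : Int) (rest : List Int) (mx : Int) :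
    loop2A ps orig (s :: rest) mx =
      (match loop2innerA ps orig s (PySem.List.pyRange (s + 1) (PySem.List.len ps) 1) mx with
       | .inl v => v
       | .inr mx' => loop2A ps orig rest mx') := rfl

theorem loop1A_cons (ps orig : List Int) (e : Int) (rest : List Int) (mx : Int) :
    loop1A ps orig (e :: rest) mx =
      (if PySem.Int.mod (PySem.List.pyGetD ps e 0) 2 = 0 then
        (if sumCheckA ps orig 0 e mx
            = PySem.Int.floordiv (PySem.List.pyGetD ps (-1) 0) 2
         then sumCheckA ps orig 0 e mx
         else loop1A ps orig rest (sumCheckA ps orig 0 e mx))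
       else loop1A ps orig rest mx) := rfl

theorem loop2A_eq (c : List Int) (hpos : ∀ x ∈ c, 0 ≤ x) (hn1 : 1 ≤ c.length) :
    ∀ (k : Nat) (m mx : Int), (c.length : Int) - 1 - m ≤ k → 1 ≤ m → 0 ≤ mx →
      mx ≤ PySem.Int.floordiv (psum c c.length) 2 →
      loop2A (mutateA c) c (PySem.List.pyRange m ((c.length : Int) - 1) 1) mx
        = outerF c (natRange m.toNat (c.length - 1)) mx := by
  intro k
  induction k with
  | zero =>
    intro m mx hk hm hmx hB
    rw [PySem.List.pyRange_one_eq_nil (by omega), natRange_nil (by omega)]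
    rfl
  | succ k ih =>
    intro m mx hk hm hmx hB
    by_cases hmn : (c.length : Int) - 1 ≤ m
    · rw [PySem.List.pyRange_one_eq_nil hmn, natRange_nil (by omega)]
      rfl
    · push_neg at hmn
      rw [PySem.List.pyRange_one_cons (by omega), loop2A_cons, len_mutateA]
      have hinner := loop2innerA_eq c hpos hn1 hm (by omega) c.length (m + 1) mx
        (by omega) (by omega) hmx hB
      rw [show (m + 1).toNat + 1 = m.toNat + 2 by omega] at hinner
      have hnr : natRange m.toNat (c.length - 1)
          = m.toNat :: natRange (m.toNat + 1) (c.length - 1) := natRange_cons (by omega)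
      rw [hnr, outerF_cons]
      rcases hinner with h | ⟨h, hB0⟩
      · rw [h]
        have hv0 : 0 ≤ innerF c m.toNat (natRange (m.toNat + 2) (c.length + 1)) mx :=
          le_trans hmx (innerF_ge _ _ _ _)
        have hvB : innerF c m.toNat (natRange (m.toNat + 2) (c.length + 1)) mx
            ≤ PySem.Int.floordiv (psum c c.length) 2 :=
          innerF_le c (fun e he => cand_le_B0 c hpos
            (by rcases mem_natRange.mp he with ⟨h1, h2⟩; omega)) hB
        have hrec := ih (m + 1) _ (by omega) (by omega) hv0 hvB
        rw [show (m + 1).toNat = m.toNat + 1 by omega] at hrec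
        exact hrec
      · rw [h]
        exact (outerF_absorb c hpos hB0).symm

theorem loop1A_nil (ps orig : List Int) (mx : Int) :
    loop1A ps orig [] mx
      = loop2A ps orig (PySem.List.pyRange 1 (PySem.List.len ps - 1) 1) mx := rfl

theorem loop1A_eq (c : List Int) (hpos : ∀ x ∈ c, 0 ≤ x) (hn1 : 1 ≤ c.length) :
    ∀ (k : Nat) (m mx : Int), (c.length : Int) - m ≤ k → 1 ≤ m → 0 ≤ mx →
      mx ≤ PySem.Int.floordiv (psum c c.length) 2 →
      loop1A (mutateA c) c (PySem.List.pyRange m (c.length : Int) 1) mx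
        = outerF c (natRange 1 (c.length - 1))
            (innerF c 0 (natRange (m.toNat + 1) (c.length + 1)) mx) := by
  intro k
  induction k with
  | zero =>
    intro m mx hk hm hmx hB
    rw [PySem.List.pyRange_one_eq_nil (by omega),
      natRange_nil (a := m.toNat + 1) (b := c.length + 1) (by omega), loop1A_nil,
      len_mutateA]
    exact loop2A_eq c hpos hn1 c.length 1 mx (by omega) le_rfl hmx hB
  | succ k ih =>
    intro m mx hk hm hmx hB
    by_cases hmn : (c.length : Int) ≤ m
    · rw [PySem.List.pyRange_one_eq_nil hmn,
        natRange_nil (a := m.toNat + 1) (b := c.length + 1) (by omega), loop1A_nil,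
        len_mutateA]
      exact loop2A_eq c hpos hn1 c.length 1 mx (by omega) le_rfl hmx hB
    · push_neg at hmn
      rw [PySem.List.pyRange_one_cons (by omega), loop1A_cons]
      have hm0 : 0 ≤ m := by omega
      have htemp : PySem.List.pyGetD (mutateA c) m 0 = psum c (m.toNat + 1) - psum c 0 := by
        rw [psA_get c hm0 hmn, psum_zero]; ring
      have hnr : natRange (m.toNat + 1) (c.length + 1)
          = (m.toNat + 1) :: natRange (m.toNat + 2) (c.length + 1) := natRange_cons (by omega)
      have hlast : PySem.List.pyGetD (mutateA c) (-1) 0 = psum c c.length :=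
        psA_last c (c_ne_nil c hn1)
      rw [htemp, hlast]
      by_cases hev : PySem.Int.mod (psum c (m.toNat + 1) - psum c 0) 2 = 0
      · rw [if_pos hev]
        have heven : 2 ∣ (psum c (m.toNat + 1) - psum c ((0 : Int)).toNat) := by
          have := (PySem.Int.mod_eq_zero_iff_dvd _ _).mp hev
          simpa using this
        have hsc : sumCheckA (mutateA c) c 0 m mx = max mx (cand c 0 (m.toNat + 1)) := by
          have := sumCheckA_eq c hpos (le_refl 0) (by omega) hmn hmx heven
          simpa using this
        have hcle : cand c 0 (m.toNat + 1) ≤ PySem.Int.floordiv (psum c c.length) 2 :=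
          cand_le_B0 c hpos (by omega)
        have hmx'0 : 0 ≤ max mx (cand c 0 (m.toNat + 1)) := le_trans hmx (le_max_left _ _)
        have hmx'B : max mx (cand c 0 (m.toNat + 1)) ≤ PySem.Int.floordiv (psum c c.length) 2 :=
          max_le hB hcle
        rw [hsc, hnr, innerF_cons]
        by_cases hex : max mx (cand c 0 (m.toNat + 1)) = PySem.Int.floordiv (psum c c.length) 2
        · rw [if_pos hex]
          have habs : innerF c 0 (natRange (m.toNat + 2) (c.length + 1))
              (max mx (cand c 0 (m.toNat + 1))) = max mx (cand c 0 (m.toNat + 1)) := by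
            apply innerF_absorb
            intro e he
            rcases mem_natRange.mp he with ⟨h1, h2⟩
            rw [hex]
            exact cand_le_B0 c hpos (by omega)
          rw [habs, outerF_absorb c hpos hex]
        · rw [if_neg hex]
          have hrec := ih (m + 1) (max mx (cand c 0 (m.toNat + 1))) (by omega) (by omega)
            hmx'0 hmx'B
          rw [show (m + 1).toNat + 1 = m.toNat + 2 by omega] at hrec
          exact hrec
      · rw [if_neg hev]
        have hc0 : cand c 0 (m.toNat + 1) = 0 := by
          unfold cand
          rw [if_neg]
          rintro ⟨hd, -⟩
          apply hev
          rw [PySem.Int.mod_eq_zero_iff_dvd]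
          simpa using hd
        have hrec := ih (m + 1) mx (by omega) (by omega) hmx hB
        rw [show (m + 1).toNat + 1 = m.toNat + 2 by omega] at hrec
        rw [hnr, innerF_cons, hc0, max_eq_left hmx]
        exact hrec

theorem solutionA_eq (c : List Int) (hpos : ∀ x ∈ c, 0 ≤ x) :
    solution c = outerF c (natRange 0 (c.length - 1)) 0 := by
  have hsol : solution c = loop1A (mutateA c) c (PySem.List.pyRange 1 (c.length : Int) 1) 0 := by
    show loop1A (mutateA c) c (PySem.List.pyRange 1 (PySem.List.len (mutateA c)) 1) 0 = _
    rw [len_mutateA]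
  rw [hsol]
  by_cases hn1 : c.length ≤ 1
  · rw [PySem.List.pyRange_one_eq_nil (by exact_mod_cast hn1), loop1A_nil, len_mutateA,
      PySem.List.pyRange_one_eq_nil (by omega), natRange_nil (by omega)]
    rfl
  · push_neg at hn1
    have h1 : 1 ≤ c.length := by omega
    have hrec := loop1A_eq c hpos h1 c.length 1 0 (by omega) le_rfl le_rfl (B0_nonneg c hpos)
    rw [hrec]
    have hnr : natRange 0 (c.length - 1) = 0 :: natRange 1 (c.length - 1) :=
      natRange_cons (by omega)
    rw [hnr, outerF_cons]
    rfl

def PSl (c : List Int) : List Int := (List.range (c.length + 1)).map (psum c)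

def bodyB (c : List Int) (s best e : Int) : Int :=
  let t := PySem.List.pyGetD (PSl c) s 0 + PySem.List.pyGetD (PSl c) e 0
  if PySem.Int.mod t 2 = 0 ∧
      PySem.Set.contains (PySem.Set.ofList (PSl c)) (PySem.Int.floordiv t 2) = true then
    let h := PySem.Int.floordiv (PySem.List.pyGetD (PSl c) e 0 - PySem.List.pyGetD (PSl c) s 0) 2
    if best < h then h else best
  else best

theorem solution_alt_eq_F (c : List Int) :
    solution_alt c
      = (PySem.List.pyRange 0 ((c.length : Int) - 1) 1).foldl (fun best s =>
          (PySem.List.pyRange (s + 2) ((c.length : Int) + 1) 1).foldl (bodyB c s) best) 0 := by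
  unfold solution_alt bodyB PSl
  rw [psB_eq, PySem.List.len_eq]

theorem PSl_get (c : List Int) {j : Nat} (hj : j ≤ c.length) :
    PySem.List.pyGetD (PSl c) (↑j) 0 = psum c j := by
  unfold PSl
  rw [PySem.List.pyGetD_natCast, List.getD_eq_getElem _ 0 (by simp; omega)]
  simp

theorem seen_iff (c : List Int) (v : Int) :
    (PySem.Set.contains (PySem.Set.ofList (PSl c)) v = true)
      ↔ ∃ j, j ≤ c.length ∧ psum c j = v := by
  rw [PySem.Set.contains_iff, PySem.Set.mem_ofList]
  unfold PSl
  simp only [List.mem_map, List.mem_range]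
  constructor
  · rintro ⟨j, hj, rfl⟩; exact ⟨j, by omega, rfl⟩
  · rintro ⟨j, hj, rfl⟩; exact ⟨j, by omega, rfl⟩

theorem bodyB_eq (c : List Int) (hpos : ∀ x ∈ c, 0 ≤ x) {sN e : Nat}
    (hse : sN < e) (he : e ≤ c.length) {mx : Int} (hmx : 0 ≤ mx) :
    bodyB c (↑sN) mx (↑e) = max mx (cand c sN e) := by
  simp only [bodyB]
  rw [PSl_get c (by omega), PSl_get c he]
  have hd_iff : PySem.Int.mod (psum c sN + psum c e) 2 = 0 ↔ 2 ∣ (psum c e - psum c sN) := by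
    rw [PySem.Int.mod_eq_zero_iff_dvd]
    constructor <;> (intro h; omega)
  by_cases hcond : 2 ∣ (psum c e - psum c sN) ∧ hasMid c sN e
  · obtain ⟨hd, hm⟩ := hcond
    have ht2 : 2 * PySem.Int.floordiv (psum c sN + psum c e) 2 = psum c sN + psum c e := by
      rw [PySem.Int.floordiv_eq_ediv_of_pos (by norm_num)]
      obtain ⟨k, hk⟩ := hd
      omega
    have hseen : PySem.Set.contains (PySem.Set.ofList (PSl c))
        (PySem.Int.floordiv (psum c sN + psum c e) 2) = true := by
      rw [seen_iff]
      obtain ⟨j, hj, hjv⟩ := hm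
      exact ⟨j, hj, by omega⟩
    rw [if_pos ⟨hd_iff.mpr hd, hseen⟩]
    have hcand : cand c sN e = PySem.Int.floordiv (psum c e - psum c sN) 2 := by
      unfold cand; rw [if_pos ⟨hd, (hasMidB_iff c _ _).mpr hm⟩]
    rw [hcand]
    split_ifs with h <;> omega
  · have hcand : cand c sN e = 0 := by
      unfold cand
      rw [if_neg fun h => hcond ⟨h.1, (hasMidB_iff c _ _).mp h.2⟩]
    rw [hcand]
    have hnot : ¬(PySem.Int.mod (psum c sN + psum c e) 2 = 0 ∧
        PySem.Set.contains (PySem.Set.ofList (PSl c))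
          (PySem.Int.floordiv (psum c sN + psum c e) 2) = true) := by
      rintro ⟨h1, h2⟩
      apply hcond
      have hd := hd_iff.mp h1
      refine ⟨hd, ?_⟩
      rw [seen_iff] at h2
      obtain ⟨j, hj, hjv⟩ := h2
      have ht2 : 2 * PySem.Int.floordiv (psum c sN + psum c e) 2 = psum c sN + psum c e := by
        rw [PySem.Int.floordiv_eq_ediv_of_pos (by norm_num)]
        obtain ⟨k, hk⟩ := hd
        omega
      exact ⟨j, hj, by omega⟩
    rw [if_neg hnot]
    omega

theorem innerB_eq (c : List Int) (hpos : ∀ x ∈ c, 0 ≤ x) {sN : Nat} :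
    ∀ (k : Nat) (m mx : Int), (c.length : Int) + 1 - m ≤ k → (sN : Int) < m → 0 ≤ mx →
      (PySem.List.pyRange m ((c.length : Int) + 1) 1).foldl (bodyB c (↑sN)) mx
        = innerF c sN (natRange m.toNat (c.length + 1)) mx := by
  intro k
  induction k with
  | zero =>
    intro m mx hk hsm hmx
    rw [PySem.List.pyRange_one_eq_nil (by omega), natRange_nil (by omega)]
    rfl
  | succ k ih =>
    intro m mx hk hsm hmx
    by_cases hmn : (c.length : Int) + 1 ≤ m
    · rw [PySem.List.pyRange_one_eq_nil hmn, natRange_nil (by omega)]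
      rfl
    · push_neg at hmn
      rw [PySem.List.pyRange_one_cons (by omega), List.foldl_cons]
      have hmcast : m = ((m.toNat : Nat) : Int) := by omega
      have hstep : bodyB c (↑sN) mx m = max mx (cand c sN m.toNat) := by
        rw [hmcast]
        exact bodyB_eq c hpos (by omega) (by omega) hmx
      rw [hstep, natRange_cons (by omega), innerF_cons]
      have hrec := ih (m + 1) (max mx (cand c sN m.toNat)) (by omega) (by omega)
        (le_trans hmx (le_max_left _ _))
      rw [show (m + 1).toNat = m.toNat + 1 by omega] at hrec
      exact hrec

theorem outerB_eq (c : List Int) (hpos : ∀ x ∈ c, 0 ≤ x) :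
    ∀ (k : Nat) (m mx : Int), (c.length : Int) - 1 - m ≤ k → 0 ≤ m → 0 ≤ mx →
      (PySem.List.pyRange m ((c.length : Int) - 1) 1).foldl (fun best s =>
          (PySem.List.pyRange (s + 2) ((c.length : Int) + 1) 1).foldl (bodyB c s) best) mx
        = outerF c (natRange m.toNat (c.length - 1)) mx := by
  intro k
  induction k with
  | zero =>
    intro m mx hk hm hmx
    rw [PySem.List.pyRange_one_eq_nil (by omega), natRange_nil (by omega)]
    rfl
  | succ k ih =>
    intro m mx hk hm hmx
    by_cases hmn : (c.length : Int) - 1 ≤ m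
    · rw [PySem.List.pyRange_one_eq_nil hmn, natRange_nil (by omega)]
      rfl
    · push_neg at hmn
      rw [PySem.List.pyRange_one_cons (by omega), List.foldl_cons]
      have hmcast : m = ((m.toNat : Nat) : Int) := by omega
      have hinner : (PySem.List.pyRange (m + 2) ((c.length : Int) + 1) 1).foldl
            (bodyB c m) mx
          = innerF c m.toNat (natRange (m.toNat + 2) (c.length + 1)) mx := by
        rw [hmcast]
        have := innerB_eq c hpos (sN := m.toNat) (c.length + 1) (m + 2) mx
          (by omega) (by omega) hmx
        rw [show (m + 2).toNat = m.toNat + 2 by omega] at this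
        rw [hmcast] at this
        exact this
      rw [hinner, natRange_cons (a := m.toNat) (b := c.length - 1) (by omega), outerF_cons]
      have hrec := ih (m + 1) (innerF c m.toNat (natRange (m.toNat + 2) (c.length + 1)) mx)
        (by omega) (by omega) (le_trans hmx (innerF_ge _ _ _ _))
      rw [show (m + 1).toNat = m.toNat + 1 by omega] at hrec
      exact hrec

theorem solutionB_eq (c : List Int) (hpos : ∀ x ∈ c, 0 ≤ x) :
    solution_alt c = outerF c (natRange 0 (c.length - 1)) 0 := by
  rw [solution_alt_eq_F c]
  have := outerB_eq c hpos c.length 0 0 (by omega) le_rfl le_rfl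
  simpa using this

theorem main_eq (c : List Int) (hpos : ∀ x ∈ c, 0 ≤ x) :
    solution c = solution_alt c := by
  rw [solutionA_eq c hpos, solutionB_eq c hpos]

theorem small0_eq : solution [] = solution_alt [] := rfl

theorem small1_eq (a : Int) : solution [a] = solution_alt [a] := rfl

theorem small2_eq (a b : Int) : solution [a, b] = solution_alt [a, b] := by
  simp only [solution, solution_alt, mutateA, PySem.List.len_eq]
  norm_num [loop1A_cons, loop1A_nil, loop2A, loop2innerA, sumCheckA, scLoop,
    PySem.List.pyRange_one_cons, PySem.List.pyRange_one_eq_nil,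
    PySem.List.pyGetD, PySem.List.pyGet?, PySem.List.pyIdx?, PySem.List.pySetD,
    PySem.List.pySet?, PySem.Int.mod_eq_emod_of_pos, PySem.Int.floordiv_eq_ediv_of_pos,
    show Int.toNat 2 = 2 from rfl, List.getElem_cons_succ, List.getElem_cons_zero]
  split_ifs <;> omega

-- ===== VERDICT (by name: the statement is the Claim_ definition above) =====
theorem solution_spec : Claim_equal_solution := by
  intro cookie _ hpre
  unfold Spec_solution
  rcases hpre with hlen | hpos
  · rcases cookie with _ | ⟨a, _ | ⟨b, _ | ⟨x, t⟩⟩⟩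
    · exact small0_eq
    · exact small1_eq a
    · exact small2_eq a b
    · simp at hlen
  · exact main_eq cookie hpos
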